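-- pv_equiv track=rewrite | github.com/rjsengar/leetcode | 2179-most-beautiful-item-for-each-query/2179-most-beautiful-item-for-each-query.py | maximumBeauty
-- ===== SOURCE A (Python) =====
-- from typing import List
--
-- def maximumBeauty(items: List[List[int]], queries: List[int]) -> List[int]:
--     items.sort()
--     ans=[]
--     d={}
--     p=queries[:]
--     queries.sort()
--     m=0
--     for i in queries:
--         j=0
--         while(j<len(items)):
--             if items[j][0]<=i:
--                 m=max(items[j][1],m)
--                 items.pop(0)
--                 j-=1
--             else:
--                 break
--             j+=1
--
--
--         ans.append(m)
--     l1=[]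
--     for i in queries:
--         d[i]=ans.pop(0)
--     for i in p:
--         l1.append(d[i])
--     return l1
-- ===== SOURCE B (Python) =====
-- def maximumBeauty(items, queries):
--     pairs = sorted(((it[0], it[1]) for it in items), key=lambda t: t[0])
--     best = [0]
--     for _, b in pairs:
--         best.append(b if b > best[-1] else best[-1])
--     res = []
--     for q in queries:
--         lo, hi = 0, len(pairs)
--         while lo < hi:
--             mid = (lo + hi) // 2
--             if pairs[mid][0] <= q:
--                 lo = mid + 1
--             else:
--                 hi = mid
--         res.append(best[lo])
--     return res
-- ===== Notes on version B (the rewrite author's own statement) =====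
-- stated objective: faster
-- what changed: Replaces A's per-query pop-from-front scan over the sorted item list plus a dict remap through sorted queries by a prefix-maximum array over the price-sorted pairs and a hand-rolled binary search per query, answering queries directly in their original order.
-- outside the precondition, e.g. on maximumBeauty([[1]], []): A returns [], B raises IndexError; on maximumBeauty([[5]], [1]): A returns [0], B raises IndexError
import Mathlib
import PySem

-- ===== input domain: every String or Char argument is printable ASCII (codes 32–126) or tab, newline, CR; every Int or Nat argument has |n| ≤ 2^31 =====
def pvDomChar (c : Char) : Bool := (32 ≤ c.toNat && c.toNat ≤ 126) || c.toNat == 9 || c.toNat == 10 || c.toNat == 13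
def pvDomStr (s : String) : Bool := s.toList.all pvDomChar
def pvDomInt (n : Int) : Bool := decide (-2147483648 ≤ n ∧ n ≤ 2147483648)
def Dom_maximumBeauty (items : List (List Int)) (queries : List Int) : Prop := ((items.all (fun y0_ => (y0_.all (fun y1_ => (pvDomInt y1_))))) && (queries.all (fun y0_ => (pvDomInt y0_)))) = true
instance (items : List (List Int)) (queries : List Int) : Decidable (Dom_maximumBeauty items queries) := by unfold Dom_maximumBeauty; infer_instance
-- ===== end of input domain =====

-- ===== PORT A =====
-- B replaces A's per-query pop-from-front scan with a prefix-maximum array and binary search (measured objective: faster).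
-- NOTE: Python A sorts `items` and `queries` IN PLACE (observable mutation); B mutates nothing. The equivalence proved
-- here is about the RETURN value only.

-- items[j][0] / items[j][1]; the .getD 0 default is only reached outside Pre_ (rows shorter than 2 entries)
def pvPrice (it : List Int) : Int := (PySem.List.pyGet? it 0).getD 0
def pvBeautyA (it : List Int) : Int := (PySem.List.pyGet? it 1).getD 0

-- A's inner while: the index j is provably always 0 (j -= 1 is followed by j += 1), so the loop
-- pops the front of `items` while items[0][0] <= i, folding beauties into m. Returns (items, m).
def pvAWhile (i : Int) (m : Int) : List (List Int) → List (List Int) × Int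
  | [] => ([], m)
  | it :: rest =>
    if pvPrice it ≤ i then pvAWhile i (max (pvBeautyA it) m) rest
    else (it :: rest, m)

-- 'for i in queries: … ans.append(m)' carrying (items, m, ans)
def pvAOuter : List Int → List (List Int) → Int → List Int → List Int
  | [], _, _, ans => ans
  | i :: qs, its, m, ans =>
    let r := pvAWhile i m its
    pvAOuter qs r.1 r.2 (ans ++ [r.2])

def maximumBeauty (items : List (List Int)) (queries : List Int) : List Int :=
  let itemsS := PySem.List.sorted items (fun x => x) false      -- items.sort()  (lexicographic list order)
  let p := queries                                              -- p = queries[:]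
  let qS := PySem.List.sorted queries (fun x => x) false        -- queries.sort()
  let ans := pvAOuter qS itemsS 0 []
  -- for i in queries: d[i] = ans.pop(0)   (pop? is never none: ans has one entry per sorted query)
  let st := qS.foldl (fun (s : PySem.Dict Int Int × List Int) i =>
      match PySem.List.pop? s.2 0 with
      | some r => (s.1.insert i r.1, r.2)
      | none => (s.1.insert i 0, s.2)) (PySem.Dict.empty, ans)
  -- for i in p: l1.append(d[i])   (d[i] never raises KeyError: every i of p is a key of d)
  p.foldl (fun acc i => acc ++ [(PySem.Dict.get? st.1 i).getD 0]) []

-- ===== PORT B =====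
-- pairs[k]; the (0, 0) default is only reached outside Pre_
def pvPairGet (ps : List (Int × Int)) (k : Int) : Int × Int := (PySem.List.pyGet? ps k).getD (0, 0)

def pvBPairs (items : List (List Int)) : List (Int × Int) :=
  PySem.List.sorted (items.map (fun it => (pvPrice it, pvBeautyA it))) (fun t => t.1) false

-- best.append(b if b > best[-1] else best[-1])
def pvBBest (pairs : List (Int × Int)) : List Int :=
  pairs.foldl (fun acc t =>
    acc ++ [if t.2 > (PySem.List.pyGet? acc (-1)).getD 0 then t.2 else (PySem.List.pyGet? acc (-1)).getD 0]) [0]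

theorem pvMidBounds {lo hi : Int} (h : lo < hi) :
    lo ≤ PySem.Int.floordiv (lo + hi) 2 ∧ PySem.Int.floordiv (lo + hi) 2 < hi := by
  constructor
  · exact (PySem.Int.floordiv_two_mid_bounds (le_of_lt h)).1
  · rw [PySem.Int.floordiv_lt_iff_lt_mul (by norm_num)]; omega

-- the hand-rolled binary search of Source B (while lo < hi: …)
def pvBSearch (pairs : List (Int × Int)) (q : Int) (lo hi : Int) : Int :=
  if h : lo < hi then
    let mid := PySem.Int.floordiv (lo + hi) 2
    if (pvPairGet pairs mid).1 ≤ q then pvBSearch pairs q (mid + 1) hi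
    else pvBSearch pairs q lo mid
  else lo
termination_by (hi - lo).toNat
decreasing_by
  · have := pvMidBounds h; omega
  · have := pvMidBounds h; omega

def maximumBeauty_alt (items : List (List Int)) (queries : List Int) : List Int :=
  let pairs := pvBPairs items
  let best := pvBBest pairs
  queries.foldl (fun acc q =>
    acc ++ [(PySem.List.pyGet? best (pvBSearch pairs q 0 (pairs.length : Int))).getD 0]) []

-- ===== PRECONDITION & SPEC =====
-- Pre_ excludes items containing a row with fewer than two entries: there A indexes items[j][0]/items[j][1]
-- lazily and either raises IndexError or accidentally returns (when queries is empty or prices stop the scan),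
-- while B reads both fields of every row up front and raises IndexError.
def Pre_maximumBeauty (items : List (List Int)) (queries : List Int) : Prop :=
  ∀ it ∈ items, 2 ≤ it.length
instance (items : List (List Int)) (queries : List Int) : Decidable (Pre_maximumBeauty items queries) := by unfold Pre_maximumBeauty; infer_instance

def pvWitness_maximumBeauty : List (List Int) × List Int := ([[1, 2], [3, 5], [2, 4]], [1, 3, 0, 2])

def Spec_maximumBeauty (items : List (List Int)) (queries : List Int) (out : List Int) : Prop := out = maximumBeauty_alt items queries
instance (items : List (List Int)) (queries : List Int) (out : List Int) : Decidable (Spec_maximumBeauty items queries out) := by unfold Spec_maximumBeauty; infer_instance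

-- ===== CLAIM (what is proved, stated in full; the proofs are below) =====
def Claim_equal_maximumBeauty : Prop := ∀ (items : List (List Int)) (queries : List Int), Dom_maximumBeauty items queries → Pre_maximumBeauty items queries → Spec_maximumBeauty items queries (maximumBeauty items queries)

-- ===== LEMMAS AND PROOFS =====
def pvF (ps : List (Int × Int)) (q : Int) : Int :=
  (ps.filter (fun t => decide (t.1 ≤ q))).foldl (fun m t => max t.2 m) 0

theorem pvFilter_eq_takeWhile {α : Type} (p : α → Bool) (l : List α)
    (h : l.Pairwise (fun a b => p a = false → p b = false)) :
    l.filter p = l.takeWhile p := by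
  induction l with
  | nil => rfl
  | cons x r ih =>
    rcases List.pairwise_cons.mp h with ⟨hx, hr⟩
    by_cases hp : p x
    · simp [hp, ih hr]
    · simp only [Bool.not_eq_true] at hp
      simp [hp, List.filter_eq_nil_iff]
      intro a ha
      simp [hx a ha hp]

def pvRun (m : Int) : List (Int × Int) → List Int
  | [] => []
  | t :: r => max t.2 m :: pvRun (max t.2 m) r

theorem pvRun_length (m : Int) (ps : List (Int × Int)) : (pvRun m ps).length = ps.length := by
  induction ps generalizing m with
  | nil => rfl
  | cons t r ih => simp [pvRun, ih]

theorem pvRun_append (m : Int) (u v : List (Int × Int)) :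
    pvRun m (u ++ v) = pvRun m u ++ pvRun (u.foldl (fun m t => max t.2 m) m) v := by
  induction u generalizing m with
  | nil => rfl
  | cons t r ih => simp [pvRun, ih, List.foldl_cons]

theorem pvRun_last (m : Int) (u : List (Int × Int)) (hu : u ≠ []) :
    (pvRun m u)[u.length - 1]? = some (u.foldl (fun m t => max t.2 m) m) := by
  induction u generalizing m with
  | nil => exact absurd rfl hu
  | cons t r ih =>
    cases r with
    | nil => simp [pvRun]
    | cons t2 r2 =>
      have h2 := ih (m := max t.2 m) (by simp)
      show (max t.2 m :: pvRun (max t.2 m) (t2 :: r2))[(t2 :: r2).length + 1 - 1]? = _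
      rw [show (t2 :: r2).length + 1 - 1 = ((t2 :: r2).length - 1) + 1 from by simp]
      rw [List.getElem?_cons_succ]
      simpa using h2

theorem pvBBest_go (ps : List (Int × Int)) (a : List Int) (m : Int) :
    ps.foldl (fun acc t =>
      acc ++ [if t.2 > (PySem.List.pyGet? acc (-1)).getD 0 then t.2 else (PySem.List.pyGet? acc (-1)).getD 0]) (a ++ [m])
    = a ++ [m] ++ pvRun m ps := by
  induction ps generalizing a m with
  | nil => simp [pvRun]
  | cons t r ih =>
    simp only [List.foldl_cons]
    rw [PySem.List.pyGet?_neg_one_append_singleton]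
    have hmax : (if t.2 > (some m).getD 0 then t.2 else (some m).getD 0) = max t.2 m := by
      simp [max_def]; omega
    rw [hmax, ih (a ++ [m]) (max t.2 m)]
    simp [pvRun]

theorem pvBBest_eq (ps : List (Int × Int)) : pvBBest ps = 0 :: pvRun 0 ps := by
  have := pvBBest_go ps [] 0
  simpa [pvBBest] using this

theorem pvBBest_at (u v : List (Int × Int)) :
    (pvBBest (u ++ v))[u.length]? = some (u.foldl (fun m t => max t.2 m) 0) := by
  rw [pvBBest_eq, pvRun_append]
  cases u with
  | nil => simp
  | cons t r =>
    rw [List.getElem?_cons]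
    split
    · simp at *
    · rw [List.getElem?_append_left (by rw [pvRun_length]; simp)]
      have := pvRun_last 0 (t :: r) (by simp)
      simpa using this


-- on a fst-sorted pair list, an index satisfies fst <= q exactly when it lies in the takeWhile prefix
theorem pvIdx_iff (ps : List (Int × Int)) (q : Int)
    (hs : ps.Pairwise (fun a b => a.1 ≤ b.1)) (idx : Nat) (hidx : idx < ps.length) :
    (ps[idx].1 ≤ q ↔ idx < (ps.takeWhile (fun t => decide (t.1 ≤ q))).length) := by
  set p : Int × Int → Bool := fun t => decide (t.1 ≤ q) with hp
  have hsplit := List.takeWhile_append_dropWhile (p := p) (l := ps)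
  set T := ps.takeWhile p with hT
  set D := ps.dropWhile p with hD
  have hmono := List.pairwise_iff_getElem.mp hs
  have hTle : T.length ≤ ps.length := by
    conv_rhs => rw [← hsplit]
    simp
  constructor
  · intro hle
    by_contra hge
    rw [not_lt] at hge
    have hTlen : T.length < ps.length := by omega
    have hDne : D ≠ [] := by
      intro h0
      rw [h0, List.append_nil] at hsplit
      rw [← hsplit] at hTlen
      omega
    have hhead : p (D.head hDne) = false := by
      have := List.head_dropWhile_not p (l := ps) (by rw [← hD] at *; exact hDne)
      simpa [← hD] using this
    have e1 : ps[T.length]? = some (D.head hDne) := by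
      conv_lhs => rw [← hsplit]
      rw [List.getElem?_append_right (Nat.le_refl _), Nat.sub_self]
      simp [← List.head?_eq_getElem?, List.head?_eq_some_head hDne]
    have e2 : ps[T.length]? = some (ps[T.length]'hTlen) := List.getElem?_eq_getElem hTlen
    have hfail : ¬ (ps[T.length]'hTlen).1 ≤ q := by
      have h4 : some (ps[T.length]'hTlen) = some (D.head hDne) := by rw [← e1, ← e2]
      injection h4 with h3
      rw [h3]
      simpa [hp] using hhead
    rcases Nat.lt_or_ge T.length idx with hlt | hge2
    · exact hfail (le_trans (hmono _ _ hTlen hidx hlt) hle)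
    · have : idx = T.length := by omega
      subst this
      exact hfail hle
  · intro hlt
    have e1 : ps[idx]? = T[idx]? := by
      conv_lhs => rw [← hsplit]
      rw [List.getElem?_append_left (by omega)]
    have e2 : T[idx]? = some (T[idx]'(by omega)) := List.getElem?_eq_getElem (by omega)
    have e3 : ps[idx]? = some (ps[idx]'hidx) := List.getElem?_eq_getElem hidx
    have hmem : p (T[idx]'(by omega)) = true := List.mem_takeWhile_imp (List.getElem_mem _)
    have h4 : some (ps[idx]'hidx) = some (T[idx]'(by omega)) := by rw [← e3, e1, e2]
    injection h4 with h3
    rw [h3]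
    simpa [hp] using hmem

theorem pvBSearch_go (ps : List (Int × Int)) (q : Int)
    (hs : ps.Pairwise (fun a b => a.1 ≤ b.1)) (n : Nat) :
    ∀ lo hi : Int, (hi - lo).toNat = n → 0 ≤ lo →
      lo ≤ ((ps.takeWhile (fun t => decide (t.1 ≤ q))).length : Int) →
      ((ps.takeWhile (fun t => decide (t.1 ≤ q))).length : Int) ≤ hi →
      hi ≤ (ps.length : Int) →
      pvBSearch ps q lo hi = ((ps.takeWhile (fun t => decide (t.1 ≤ q))).length : Int) := by
  induction n using Nat.strong_induction_on with
  | h n ih =>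
    intro lo hi hn h0 hlc hch hhl
    rw [pvBSearch]
    split
    · next hlt =>
      have hmid := pvMidBounds hlt
      set mid := PySem.Int.floordiv (lo + hi) 2 with hmiddef
      have hmidnat : mid = ((mid.toNat : Int)) := by omega
      have hmlen : mid.toNat < ps.length := by omega
      have hget : pvPairGet ps mid = ps[mid.toNat] := by
        rw [pvPairGet]
        conv_lhs => rw [hmidnat]
        rw [PySem.List.pyGet?_natCast, List.getElem?_eq_getElem hmlen]
        rfl
      have hiff := pvIdx_iff ps q hs mid.toNat hmlen
      dsimp only
      split
      · next hle =>
        rw [hget] at hle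
        have hc : mid + 1 ≤ ((ps.takeWhile (fun t => decide (t.1 ≤ q))).length : Int) := by
          have := hiff.mp hle
          omega
        exact ih (hi - (mid + 1)).toNat (by omega) (mid + 1) hi (by omega) (by omega) hc hch hhl
      · next hgt =>
        rw [hget] at hgt
        have hc : ((ps.takeWhile (fun t => decide (t.1 ≤ q))).length : Int) ≤ mid := by
          by_contra hcc
          exact hgt (hiff.mpr (by omega))
        exact ih (mid - lo).toNat (by omega) lo mid (by omega) h0 hlc hc (by omega)
    · next hge => omega

theorem pvBSearch_spec (ps : List (Int × Int)) (q : Int)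
    (hs : ps.Pairwise (fun a b => a.1 ≤ b.1)) :
    pvBSearch ps q 0 (ps.length : Int)
      = ((ps.takeWhile (fun t => decide (t.1 ≤ q))).length : Int) := by
  have hlen : (ps.takeWhile (fun t => decide (t.1 ≤ q))).length ≤ ps.length :=
    (List.takeWhile_sublist _).length_le
  exact pvBSearch_go ps q hs _ 0 (ps.length : Int) rfl (by omega) (by omega) (by omega) (by omega)

theorem pvBVal (pairs : List (Int × Int)) (q : Int)
    (hs : pairs.Pairwise (fun a b => a.1 ≤ b.1)) :
    (PySem.List.pyGet? (pvBBest pairs) (pvBSearch pairs q 0 (pairs.length : Int))).getD 0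
      = pvF pairs q := by
  rw [pvBSearch_spec pairs q hs, PySem.List.pyGet?_natCast]
  have hsplit := List.takeWhile_append_dropWhile (p := fun t => decide (t.1 ≤ q)) (l := pairs)
  have hat := pvBBest_at (pairs.takeWhile (fun t => decide (t.1 ≤ q)))
      (pairs.dropWhile (fun t => decide (t.1 ≤ q)))
  rw [hsplit] at hat
  rw [hat]
  have hfil : pairs.filter (fun t => decide (t.1 ≤ q)) = pairs.takeWhile (fun t => decide (t.1 ≤ q)) := by
    refine pvFilter_eq_takeWhile _ _ (hs.imp_of_mem ?_)
    intro a b _ _ hab hfa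
    simp only [decide_eq_false_iff_not, not_le] at *
    omega
  rw [pvF, hfil]
  rfl

theorem maximumBeauty_B_eq (items : List (List Int)) (queries : List Int) :
    maximumBeauty_alt items queries = queries.map (pvF (pvBPairs items)) := by
  rw [maximumBeauty_alt]
  rw [PySem.List.foldl_append_singleton_eq_map]
  rw [List.nil_append]
  refine List.map_congr_left ?_
  intro q _
  exact pvBVal (pvBPairs items) q (PySem.List.sorted_pairwise _ _)

-- ---- A side ----
theorem pvPrice_cons (x : Int) (r : List Int) : pvPrice (x :: r) = x := by
  simp [pvPrice, PySem.List.pyGet?, PySem.List.pyIdx?]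

def pvStep (m : Int) (it : List Int) : Int := max (pvBeautyA it) m

def pvGG (its : List (List Int)) (m q : Int) : Int :=
  (its.filter (fun it => decide (pvPrice it ≤ q))).foldl pvStep m

theorem pvSorted_inst_eq (items : List (List Int)) :
    (PySem.List.sorted items (fun x => x) false)
      = (@PySem.List.sorted (List Int) (List Int) List.instLinearOrder.toLT LinearOrder.toDecidableLT items (fun x => x) false) := by
  congr 1

theorem pvSortedA_price_pairwise (items : List (List Int)) (hpre : ∀ it ∈ items, it ≠ []) :
    (PySem.List.sorted items (fun x => x) false).Pairwise (fun a b => pvPrice a ≤ pvPrice b) := by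
  rw [pvSorted_inst_eq]
  refine (PySem.List.sorted_pairwise (κ := List Int) items (fun x => x)).imp_of_mem ?_
  intro a b ha hb hab
  have ha' : a ≠ [] := hpre a ((@PySem.List.mem_sorted (List Int) (List Int) List.instLinearOrder.toLT LinearOrder.toDecidableLT items (fun x => x) false a).mp ha)
  have hb' : b ≠ [] := hpre b ((@PySem.List.mem_sorted (List Int) (List Int) List.instLinearOrder.toLT LinearOrder.toDecidableLT items (fun x => x) false b).mp hb)
  obtain ⟨x, ra, rfl⟩ := List.exists_cons_of_ne_nil ha'
  obtain ⟨y, rb, rfl⟩ := List.exists_cons_of_ne_nil hb'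
  rw [pvPrice_cons, pvPrice_cons]
  rcases lt_or_eq_of_le hab with hlt | heq
  · have hlex : List.Lex (· < ·) (x :: ra) (y :: rb) := hlt
    cases hlex with
    | cons h' => exact le_refl _
    | rel h' => exact le_of_lt h'
  · injection heq with h1 _
    exact le_of_eq h1

theorem pvAWhile_spec (i : Int) (its : List (List Int)) (m : Int)
    (h : its.Pairwise (fun a b => pvPrice a ≤ pvPrice b)) :
    pvAWhile i m its =
      (its.dropWhile (fun it => decide (pvPrice it ≤ i)), pvGG its m i) := by
  induction its generalizing m with
  | nil => rfl
  | cons it rest ih =>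
    rcases List.pairwise_cons.mp h with ⟨hx, hr⟩
    by_cases hp : pvPrice it ≤ i
    · rw [pvAWhile, if_pos hp, ih _ hr, List.dropWhile_cons_of_pos (by simpa using hp)]
      rw [pvGG, pvGG, List.filter_cons_of_pos (by simpa using hp), List.foldl_cons]
      rfl
    · rw [pvAWhile, if_neg hp, List.dropWhile_cons_of_neg (by simpa using hp)]
      rw [pvGG, List.filter_cons_of_neg (by simpa using hp)]
      rw [List.filter_eq_nil_iff.mpr (by
        intro a ha
        simp only [decide_eq_true_eq, not_le] at *
        exact lt_of_lt_of_le hp (hx a ha))]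
      rfl

theorem pvBeautyA_mono_filter_eq_takeWhile (its : List (List Int)) (q : Int)
    (h : its.Pairwise (fun a b => pvPrice a ≤ pvPrice b)) :
    its.filter (fun it => decide (pvPrice it ≤ q)) = its.takeWhile (fun it => decide (pvPrice it ≤ q)) := by
  refine pvFilter_eq_takeWhile _ _ (h.imp_of_mem ?_)
  intro a b _ _ hab hfa
  simp only [decide_eq_false_iff_not, not_le] at *
  omega

theorem pvGG_shift (its : List (List Int)) (m q q' : Int) (hq : q ≤ q')
    (h : its.Pairwise (fun a b => pvPrice a ≤ pvPrice b)) :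
    pvGG (its.dropWhile (fun it => decide (pvPrice it ≤ q))) (pvGG its m q) q' = pvGG its m q' := by
  have hsplit := List.takeWhile_append_dropWhile (p := fun it => decide (pvPrice it ≤ q)) (l := its)
  set T := its.takeWhile (fun it => decide (pvPrice it ≤ q)) with hT
  set D := its.dropWhile (fun it => decide (pvPrice it ≤ q)) with hD
  have h1 : pvGG its m q = T.foldl pvStep m := by
    rw [pvGG, pvBeautyA_mono_filter_eq_takeWhile its q h]
  have hTfull : T.filter (fun it => decide (pvPrice it ≤ q')) = T := by
    rw [List.filter_eq_self]
    intro a ha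
    rw [hT] at ha
    have := List.mem_takeWhile_imp ha
    simp only [decide_eq_true_eq] at *
    omega
  conv_rhs => rw [pvGG]
  conv_rhs => rw [← hsplit]
  rw [List.filter_append, List.foldl_append, hTfull, h1]
  rfl

theorem pvAOuter_spec (qs : List Int) (its : List (List Int)) (m : Int) (ans : List Int)
    (hits : its.Pairwise (fun a b => pvPrice a ≤ pvPrice b))
    (hqs : qs.Pairwise (· ≤ ·)) :
    pvAOuter qs its m ans = ans ++ qs.map (pvGG its m) := by
  induction qs generalizing its m ans with
  | nil => simp [pvAOuter]
  | cons q qs' ih =>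
    rcases List.pairwise_cons.mp hqs with ⟨hq1, hqs'⟩
    rw [pvAOuter, pvAWhile_spec q its m hits]
    rw [ih _ _ _ (hits.sublist (List.dropWhile_sublist _)) hqs']
    rw [List.append_assoc]
    congr 1
    rw [List.map_cons, List.singleton_append]
    congr 1
    refine List.map_congr_left ?_
    intro q' hq'
    exact pvGG_shift its m q q' (hq1 q' hq') hits

theorem pvDict_fold_spec (qs : List Int) (d : PySem.Dict Int Int) (f : Int → Int) :
    qs.foldl (fun (s : PySem.Dict Int Int × List Int) i =>
      match PySem.List.pop? s.2 0 with
      | some r => (s.1.insert i r.1, r.2)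
      | none => (s.1.insert i 0, s.2)) (d, qs.map f)
    = (qs.foldl (fun d i => d.insert i (f i)) d, []) := by
  induction qs generalizing d with
  | nil => rfl
  | cons q qs' ih =>
    rw [List.map_cons, List.foldl_cons, List.foldl_cons]
    rw [show PySem.List.pop? (f q :: qs'.map f) 0 = some (f q, qs'.map f) from PySem.List.pop?_zero_cons _ _]
    exact ih (d.insert q (f q))

theorem pvDict_get (qs : List Int) (d : PySem.Dict Int Int) (f : Int → Int) (k : Int) :
    (qs.foldl (fun d i => d.insert i (f i)) d).get? k
      = if k ∈ qs then some (f k) else d.get? k := by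
  induction qs generalizing d with
  | nil => simp
  | cons q qs' ih =>
    rw [List.foldl_cons, ih]
    by_cases hk : k ∈ qs'
    · simp [hk]
    · rw [if_neg hk]
      by_cases hkq : k = q
      · subst hkq
        rw [if_pos List.mem_cons_self]
        exact PySem.Dict.get?_insert_self d k (f k)
      · rw [if_neg (by simp [hk, hkq]), PySem.Dict.get?_insert_of_ne d (f q) hkq]

theorem pvF_perm (ps ps' : List (Int × Int)) (hp : ps.Perm ps') (q : Int) :
    pvF ps q = pvF ps' q := by
  rw [pvF, pvF]
  exact List.Perm.foldl_eq' (hp.filter _)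
    (by
      intro x _ y _ z
      simp only [max_left_comm, max_comm]) 0

theorem pvGG_eq_pvF (items : List (List Int)) (q : Int) :
    pvGG (PySem.List.sorted items (fun x => x) false) 0 q = pvF (pvBPairs items) q := by
  set mp : List Int → Int × Int := fun it => (pvPrice it, pvBeautyA it) with hmp
  set S := PySem.List.sorted items (fun x => x) false with hS
  have h1 : pvGG S 0 q = pvF (S.map mp) q := by
    rw [pvGG, pvF, List.filter_map, List.foldl_map]
    rfl
  rw [h1]
  refine pvF_perm _ _ ?_ q
  have hperm1 : S.Perm items := PySem.List.sorted_perm items (fun x => x) false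
  have hperm2 : (pvBPairs items).Perm (items.map mp) :=
    PySem.List.sorted_perm (items.map mp) (fun t => t.1) false
  exact (hperm1.map mp).trans hperm2.symm

theorem maximumBeauty_A_eq (items : List (List Int)) (queries : List Int)
    (hpre : ∀ it ∈ items, 2 ≤ it.length) :
    maximumBeauty items queries = queries.map (pvF (pvBPairs items)) := by
  rw [maximumBeauty]
  have hits := pvSortedA_price_pairwise items (by
    intro it h e
    have := hpre it h
    subst e
    simp at this)
  have hqs : (PySem.List.sorted queries (fun x => x) false).Pairwise (fun a b => a ≤ b) :=
    PySem.List.sorted_pairwise queries (fun x => x)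
  rw [pvAOuter_spec _ _ _ _ hits hqs, List.nil_append]
  rw [pvDict_fold_spec (PySem.List.sorted queries (fun x => x) false) PySem.Dict.empty
    (pvGG (PySem.List.sorted items (fun x => x) false) 0)]
  rw [PySem.List.foldl_append_singleton_eq_map, List.nil_append]
  refine List.map_congr_left ?_
  intro i hi
  rw [show ((PySem.List.sorted queries (fun x => x) false).foldl
        (fun d i => d.insert i (pvGG (PySem.List.sorted items (fun x => x) false) 0 i)) PySem.Dict.empty, ([] : List Int)).1
      = (PySem.List.sorted queries (fun x => x) false).foldl
        (fun d i => d.insert i (pvGG (PySem.List.sorted items (fun x => x) false) 0 i)) PySem.Dict.empty from rfl]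
  rw [pvDict_get, if_pos ((PySem.List.mem_sorted queries (fun x => x) false i).mpr hi)]
  rw [Option.getD_some]
  exact pvGG_eq_pvF items i

-- ===== VERDICT (by name: the statement is the Claim_ definition above) =====
theorem maximumBeauty_spec : Claim_equal_maximumBeauty := by
  intro items queries _ hpre
  unfold Spec_maximumBeauty
  rw [maximumBeauty_A_eq items queries hpre, maximumBeauty_B_eq]
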